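-- pv_equiv track=rewrite | github.com/AkshayAD/AI-Data-Analaysis-31Aug | src/python/reporting/report_generator.py | _prioritize_insights
-- ===== SOURCE A (Python) =====
-- from typing import Dict, List, Any, Optional
--
-- def _prioritize_insights(insights: List[str]) -> List[str]:
--     """Prioritize and deduplicate insights"""
--     # Remove duplicates while preserving order
--     seen = set()
--     unique_insights = []
--     for insight in insights:
--         if insight not in seen:
--             seen.add(insight)
--             unique_insights.append(insight)
--
--     # Prioritize by keywords
--     priority_keywords = ['significant', 'critical', 'important', 'anomaly', 'trend', 'correlation']
--
--     prioritized = []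
--     regular = []
--
--     for insight in unique_insights:
--         if any(keyword in insight.lower() for keyword in priority_keywords):
--             prioritized.append(insight)
--         else:
--             regular.append(insight)
--
--     return prioritized + regular
-- ===== SOURCE B (Python) =====
-- def _prioritize_insights(insights):
--     """Prioritize and deduplicate insights (dedupe via dict.fromkeys, one stable sort)."""
--     priority_keywords = ['significant', 'critical', 'important', 'anomaly', 'trend', 'correlation']
--     unique_insights = list(dict.fromkeys(insights))
--     return sorted(unique_insights,
--                   key=lambda s: not any(kw in s.lower() for kw in priority_keywords))
-- ===== Notes on version B (the rewrite author's own statement) =====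
-- stated objective: simpler
-- what changed: Replaces the manual seen-set dedup loop with dict.fromkeys and the two-bucket partition loop with a single stable sort keyed on the negated keyword match (stability keeps original order within each group).
import Mathlib
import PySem

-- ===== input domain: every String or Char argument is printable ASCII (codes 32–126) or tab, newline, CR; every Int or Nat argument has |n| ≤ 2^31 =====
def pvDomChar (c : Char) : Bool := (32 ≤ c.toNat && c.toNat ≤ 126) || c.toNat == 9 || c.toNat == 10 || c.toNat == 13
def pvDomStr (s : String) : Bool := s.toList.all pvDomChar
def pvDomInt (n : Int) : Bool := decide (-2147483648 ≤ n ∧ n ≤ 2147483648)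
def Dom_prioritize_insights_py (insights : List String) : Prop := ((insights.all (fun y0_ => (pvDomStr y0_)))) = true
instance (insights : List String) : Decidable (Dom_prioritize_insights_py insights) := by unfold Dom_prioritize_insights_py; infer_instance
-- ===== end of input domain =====

-- B replaces A's seen-set dedup loop by dict.fromkeys and its two-bucket partition
-- by one stable sort keyed on the negated keyword match (objective: simpler).

-- ===== PORT A =====
def pvKeywords : List String :=
  ["significant", "critical", "important", "anomaly", "trend", "correlation"]

-- any(keyword in insight.lower() for keyword in priority_keywords)
def pvHasKeyword (insight : String) : Bool :=
  pvKeywords.any (fun kw => PySem.Str.isIn kw (PySem.Str.lower insight))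

def prioritize_insights_py (insights : List String) : List String :=
  -- seen = set(); unique_insights = []; for insight in insights: …
  let su := insights.foldl
    (fun (p : PySem.Set String × List String) insight =>
      if PySem.Set.contains p.1 insight then p
      else (PySem.Set.add p.1 insight, p.2 ++ [insight]))
    (PySem.Set.empty, [])
  let unique_insights := su.2
  -- prioritized = []; regular = []; for insight in unique_insights: …
  let pr := unique_insights.foldl
    (fun (p : List String × List String) insight =>
      if pvHasKeyword insight then (p.1 ++ [insight], p.2)
      else (p.1, p.2 ++ [insight]))
    ([], [])
  pr.1 ++ pr.2

-- ===== PORT B =====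
-- key=lambda s: not any(kw in s.lower() for kw in priority_keywords)
def pvSortKey (s : String) : Bool :=
  !(pvKeywords.any (fun kw => PySem.Str.isIn kw (PySem.Str.lower s)))

def prioritize_insights_py_alt (insights : List String) : List String :=
  PySem.List.sorted (PySem.List.dedup insights) pvSortKey false

-- ===== PRECONDITION & SPEC =====
def Spec_prioritize_insights_py (insights : List String) (out : List String) : Prop := out = prioritize_insights_py_alt insights
instance (insights : List String) (out : List String) : Decidable (Spec_prioritize_insights_py insights out) := by unfold Spec_prioritize_insights_py; infer_instance

-- ===== CLAIM (what is proved, stated in full; the proofs are below) =====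
def Claim_equal_prioritize_insights_py : Prop := ∀ (insights : List String), Dom_prioritize_insights_py insights → Spec_prioritize_insights_py insights (prioritize_insights_py insights)

-- ===== LEMMAS AND PROOFS =====

-- A's dedup loop keeps seen = unique_insights (as lists) and computes PySem.Set.ofList.
theorem pv_dedup_fold (xs : List String) (s : PySem.Set String) :
    xs.foldl
      (fun (p : PySem.Set String × List String) insight =>
        if PySem.Set.contains p.1 insight then p
        else (PySem.Set.add p.1 insight, p.2 ++ [insight]))
      (s, s) = (PySem.Set.update s xs, PySem.Set.update s xs) := by
  induction xs generalizing s with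
  | nil => simp [PySem.Set.update]
  | cons x xs ih =>
    simp only [List.foldl_cons, PySem.Set.update, List.foldl_cons] at *
    have hstep : (if PySem.Set.contains s x then (s, s)
        else (PySem.Set.add s x, s ++ [x])) = (PySem.Set.add s x, PySem.Set.add s x) := by
      by_cases h : PySem.Set.contains s x <;>
        simp only [h, if_true, Bool.false_eq_true, if_false, PySem.Set.add]
    rw [show ((if PySem.Set.contains s x then (s, s)
        else (PySem.Set.add s x, s ++ [x])) : PySem.Set String × List String)
          = (PySem.Set.add s x, PySem.Set.add s x) from hstep] at *
    exact ih (PySem.Set.add s x)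

-- A's partition loop: pair-accumulator fold filters into the two buckets.
theorem pv_partition_fold (c : String → Bool) (xs p0 r0 : List String) :
    xs.foldl
      (fun (p : List String × List String) insight =>
        if c insight then (p.1 ++ [insight], p.2)
        else (p.1, p.2 ++ [insight]))
      (p0, r0) = (p0 ++ xs.filter c, r0 ++ xs.filter (fun x => !c x)) := by
  induction xs generalizing p0 r0 with
  | nil => simp
  | cons x xs ih =>
    by_cases h : c x <;> simp [h, ih]

theorem pv_insertBy_append (before : String → String → Bool) (x : String)
    (F T : List String) (hF : ∀ y ∈ F, before x y = false) :
    PySem.List.insertBy before x (F ++ T) = F ++ PySem.List.insertBy before x T := by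
  induction F with
  | nil => simp
  | cons y F ih =>
    have hy : before x y = false := hF y (by simp)
    simp only [List.cons_append, PySem.List.insertBy, hy, Bool.false_eq_true, if_false]
    simp [ih (fun z hz => hF z (by simp [hz]))]

-- Stable sort by a Bool key = false-keyed elements (in order) then true-keyed ones.
theorem pv_sorted_bool (key : String → Bool) (xs : List String) :
    PySem.List.sorted xs key false
      = xs.filter (fun x => !key x) ++ xs.filter (fun x => key x) := by
  rw [PySem.List.sorted_eq_foldl_insertBy]
  induction xs using List.reverseRecOn with
  | nil => simp
  | append_singleton xs x ih =>
    rw [List.foldl_append, List.foldl_cons, List.foldl_nil, ih]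
    by_cases hx : key x
    · rw [PySem.List.insertBy_of_forall_not_before]
      · simp [List.filter_append, hx]
      · intro y hy
        rcases List.mem_append.mp hy with h | h
        · have := List.of_mem_filter h
          simp only [Bool.not_eq_eq_eq_not, Bool.not_true] at this
          simp [hx, this]
        · have := List.of_mem_filter h
          simp [hx, this]
    · rw [pv_insertBy_append]
      · rcases hT : xs.filter (fun x => key x) with _ | ⟨y, ys⟩
        · have hall : ∀ a ∈ xs, ¬ key a = true := List.filter_eq_nil_iff.mp hT
          simp only [Bool.not_eq_true] at hall
          simp [PySem.List.insertBy, List.filter_append, hx]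
          exact hall
        · have hy : key y = true := List.of_mem_filter (by rw [hT]; simp)
          simp only [PySem.List.insertBy, Bool.lt_iff]
          simp [hx, hy, List.filter_append, ← hT]
      · intro y hy
        have := List.of_mem_filter hy
        simp only [Bool.not_eq_eq_eq_not, Bool.not_true] at this
        simp [Bool.lt_iff, this]

-- ===== VERDICT (by name: the statement is the Claim_ definition above) =====
theorem prioritize_insights_py_spec : Claim_equal_prioritize_insights_py := by
  intro insights _
  show prioritize_insights_py insights = prioritize_insights_py_alt insights
  unfold prioritize_insights_py prioritize_insights_py_alt
  have h0 : (PySem.Set.empty : PySem.Set String) = ([] : List String) := rfl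
  have hkey : pvSortKey = fun s => !pvHasKeyword s := rfl
  rw [h0, pv_dedup_fold insights []]
  simp only [pv_partition_fold, pv_sorted_bool, hkey, Bool.not_not,
    PySem.List.dedup_eq_ofList, PySem.Set.ofList_eq_foldl, PySem.Set.update,
    List.nil_append]
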